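-- pv_equiv track=rewrite | github.com/Khrysys/AlephCITesting | chess/tools/table_builder.py | _calculate_single_between
-- ===== SOURCE A (Python) =====
-- def rank_file(sq: int) -> tuple[int, int]:
--     '''
--     Docstring for row_file
--
--     :param sq: Integer square index on the board, 0-63.
--     :type sq: int
--     :return: A tuple containing the rank and file of the square on a chessboard as (rank, file).
--     :rtype: tuple[int, int]
--     '''
--     return divmod(sq, 8)
--
-- def index_for(r: int, f: int) -> int:
--     return (r * 8) + f
--
-- def bit_for(sq: int) -> int:
--     return 1 << sq
--
-- def _calculate_single_between(f: int, t: int) -> int: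
--     if f == t:
--         return 0
--
--     fr, ff = rank_file(f)
--     tr, tf = rank_file(t)
--
--     dr = tr - fr
--     df = tf - ff
--
--     # Determine direction
--     step_r = 0
--     step_f = 0
--
--     if dr == 0 and df != 0:
--         step_r = 0
--         step_f = 1 if df > 0 else -1
--     elif df == 0 and dr != 0:
--         step_r = 1 if dr > 0 else -1
--         step_f = 0
--     elif abs(dr) == abs(df):
--         step_r = 1 if dr > 0 else -1
--         step_f = 1 if df > 0 else -1
--     else:
--         return 0  # Not aligned
--
--     bb = 0
--     r = fr + step_r
--     f_ = ff + step_f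
--
--     while 0 <= r < 8 and 0 <= f_ < 8:
--         sq = index_for(r, f_)
--         if sq == t:
--             return bb
--         bb |= bit_for(sq)
--         r += step_r
--         f_ += step_f
--
--     return 0
-- ===== SOURCE B (Python) =====
-- def rank_file(sq: int) -> tuple[int, int]:
--     return divmod(sq, 8)
--
-- def _calculate_single_between(f: int, t: int) -> int:
--     if f == t:
--         return 0
--     fr, ff = rank_file(f)
--     tr, tf = rank_file(t)
--     dr = tr - fr
--     df = tf - ff
--     if dr != 0 and df != 0 and abs(dr) != abs(df):
--         return 0  # not aligned
--     n = max(abs(dr), abs(df))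
--     step_r = (dr > 0) - (dr < 0)
--     step_f = (df > 0) - (df < 0)
--     # target square and the first hop must lie on the board,
--     # which (by monotonicity) puts the whole path on the board
--     if not (0 <= t <= 63 and 0 <= fr + step_r < 8 and 0 <= ff + step_f < 8):
--         return 0
--     s = min(f, t)
--     d = (max(f, t) - s) // n  # per-hop index stride (1, 7, 8 or 9)
--     # geometric closed form of sum(2**(s + j*d) for j in 1..n-1): no loop at all
--     return (((1 << ((n - 1) * d)) - 1) // ((1 << d) - 1)) << (s + d)
-- ===== Notes on version B (the rewrite author's own statement) =====
-- stated objective: alternative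
-- what changed: A walks square-by-square from f toward t, OR-ing each square's bit into an accumulator until it hits t or falls off the board; B never iterates over squares at all: after the same alignment classification it checks one closed-form on-board guard (target and first hop on the board) and then produces the whole between-mask as the loop-free geometric series ((2^((n-1)*d)-1) // (2^d-1)) << (s+d), where s is the lower square and d the per-hop index stride.
import Mathlib
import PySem

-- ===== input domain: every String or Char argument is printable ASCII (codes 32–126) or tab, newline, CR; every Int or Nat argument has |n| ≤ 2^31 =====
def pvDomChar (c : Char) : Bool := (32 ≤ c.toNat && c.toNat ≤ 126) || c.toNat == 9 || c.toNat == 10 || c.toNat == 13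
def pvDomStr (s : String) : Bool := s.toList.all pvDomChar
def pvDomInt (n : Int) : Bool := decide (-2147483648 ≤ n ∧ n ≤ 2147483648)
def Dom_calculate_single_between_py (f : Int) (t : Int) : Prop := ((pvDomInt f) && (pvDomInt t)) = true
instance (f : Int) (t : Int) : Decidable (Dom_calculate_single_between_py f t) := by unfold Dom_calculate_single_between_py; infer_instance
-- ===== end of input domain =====

-- B replaces A's square-by-square sentinel walk (accumulate bits until t is hit or the walk
-- falls off the board) by a loop-free geometric closed form: a single on-board guard and
-- ((2^((n-1)d)-1) / (2^d-1)) << (s+d), the sum of the intermediate bits (objective: alternative).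

-- ===== PORT A =====
def rank_file_py (sq : Int) : Int × Int := (PySem.Int.floordiv sq 8, PySem.Int.mod sq 8)

def index_for_py (r : Int) (f : Int) : Int := (r * 8) + f

-- Python's '1 << sq'; exact for sq ≥ 0, and both programs only call it with sq in [0, 63]
def bit_for_py (sq : Int) : Int := 1 <<< sq.toNat

-- the while loop of A ('|=' is Int.lor); its body runs at most 9 times (the moving coordinate
-- stays in [0,8)), so the constant fuel 16 the port passes is never exhausted
def betweenLoop (step_r : Int) (step_f : Int) (t : Int) : Nat → Int → Int → Int → Int
  | 0, _, _, _ => 0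
  | fuel + 1, bb, r, f_ =>
    if 0 ≤ r ∧ r < 8 ∧ 0 ≤ f_ ∧ f_ < 8 then
      if index_for_py r f_ = t then bb
      else betweenLoop step_r step_f t fuel (Int.lor bb (bit_for_py (index_for_py r f_)))
             (r + step_r) (f_ + step_f)
    else 0

-- A's body after the divmods: the step-direction if/elif chain, each arm entering the walk
def calcA_core (t fr ff tr tf : Int) : Int :=
  if tr - fr = 0 ∧ tf - ff ≠ 0 then
    betweenLoop 0 (if 0 < tf - ff then 1 else -1) t 16 0
      (fr + 0) (ff + (if 0 < tf - ff then 1 else -1))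
  else if tf - ff = 0 ∧ tr - fr ≠ 0 then
    betweenLoop (if 0 < tr - fr then 1 else -1) 0 t 16 0
      (fr + (if 0 < tr - fr then 1 else -1)) (ff + 0)
  else if |tr - fr| = |tf - ff| then
    betweenLoop (if 0 < tr - fr then 1 else -1) (if 0 < tf - ff then 1 else -1) t 16 0
      (fr + (if 0 < tr - fr then 1 else -1)) (ff + (if 0 < tf - ff then 1 else -1))
  else 0

def calculate_single_between_py (f : Int) (t : Int) : Int :=
  if f = t then 0
  else calcA_core t (rank_file_py f).1 (rank_file_py f).2 (rank_file_py t).1 (rank_file_py t).2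

-- ===== PORT B =====
-- B's body after the divmods: alignment test, hop count n, signed unit steps, one closed-form
-- on-board guard, then the loop-free geometric formula for the sum of the intermediate bits
def calcB_core (f t fr ff tr tf : Int) : Int :=
  if tr - fr ≠ 0 ∧ tf - ff ≠ 0 ∧ |tr - fr| ≠ |tf - ff| then 0
  else
    let n := max |tr - fr| |tf - ff|
    let step_r := (if 0 < tr - fr then (1 : Int) else 0) - (if tr - fr < 0 then 1 else 0)
    let step_f := (if 0 < tf - ff then (1 : Int) else 0) - (if tf - ff < 0 then 1 else 0)
    if ¬(0 ≤ t ∧ t ≤ 63 ∧ 0 ≤ fr + step_r ∧ fr + step_r < 8 ∧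
          0 ≤ ff + step_f ∧ ff + step_f < 8) then 0
    else
      let s := min f t
      -- shifts: the amounts are provably ≥ 0 in this branch, so .toNat is exact here
      let d := PySem.Int.floordiv (max f t - s) n
      (PySem.Int.floordiv ((1 <<< ((n - 1) * d).toNat) - 1) ((1 <<< d.toNat) - 1)) <<< (s + d).toNat

def calculate_single_between_py_alt (f : Int) (t : Int) : Int :=
  if f = t then 0
  else calcB_core f t (rank_file_py f).1 (rank_file_py f).2 (rank_file_py t).1 (rank_file_py t).2

-- ===== PRECONDITION & SPEC =====
def Spec_calculate_single_between_py (f : Int) (t : Int) (out : Int) : Prop := out = calculate_single_between_py_alt f t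
instance (f : Int) (t : Int) (out : Int) : Decidable (Spec_calculate_single_between_py f t out) := by unfold Spec_calculate_single_between_py; infer_instance

-- ===== CLAIM (what is proved, stated in full; the proofs are below) =====
def Claim_equal_calculate_single_between_py : Prop := ∀ (f : Int) (t : Int), Dom_calculate_single_between_py f t → Spec_calculate_single_between_py f t (calculate_single_between_py f t)

-- ===== LEMMAS AND PROOFS =====

-- ---- Nat-level facts about bits and the geometric sum ----

-- disjoint bits: if a lives below 2^k and b is a multiple of 2^k, OR is addition
lemma pvLorAdd (a b k : ℕ) (h : a < 2^k) (hb : 2^k ∣ b) : b ||| a = b + a := by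
  obtain ⟨c, rfl⟩ := hb
  rw [mul_comm]
  have h2 := Nat.shiftLeft_add_eq_or_of_lt (a := c) h
  simp [Nat.shiftLeft_eq] at h2
  omega

lemma pvSumLt (d e0 : ℕ) (hd : 1 ≤ d) (m : ℕ) :
    ∑ k ∈ Finset.range m, 2^(e0 + k*d) < 2^(e0 + m*d) := by
  induction m with
  | zero => simp
  | succ m ih =>
    rw [Finset.sum_range_succ]
    have h1 : 2^(e0 + m*d) + 2^(e0 + m*d) ≤ 2^(e0 + (m+1)*d) := by
      rw [← two_mul, ← pow_succ']
      exact Nat.pow_le_pow_right (by norm_num) (by nlinarith)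
    omega

-- ascending OR-fold of distinct bits is the geometric sum
lemma pvFoldAsc (d e0 : ℕ) (hd : 1 ≤ d) (m : ℕ) :
    (List.range m).foldl (fun a k => a ||| 2^(e0 + k*d)) 0
      = ∑ k ∈ Finset.range m, 2^(e0 + k*d) := by
  induction m with
  | zero => simp
  | succ m ih =>
    rw [List.range_succ, List.foldl_append, List.foldl_cons, List.foldl_nil, ih,
      Nat.lor_comm, pvLorAdd _ _ (e0 + m*d) (pvSumLt d e0 hd m) dvd_rfl,
      Finset.sum_range_succ]
    omega

-- descending OR-fold of distinct bits is the same geometric sum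
lemma pvFoldDesc (d : ℕ) (hd : 1 ≤ d) :
    ∀ (m e0 : ℕ),
      (List.range m).foldl (fun a k => a ||| 2^(e0 + (m - 1 - k)*d)) 0
        = ∑ k ∈ Finset.range m, 2^(e0 + k*d) := by
  intro m
  induction m with
  | zero => intro e0; simp
  | succ m ih =>
    intro e0
    rw [List.range_succ, List.foldl_append, List.foldl_cons, List.foldl_nil]
    have hcg : (List.range m).foldl (fun a k => a ||| 2^(e0 + (m + 1 - 1 - k)*d)) 0
        = (List.range m).foldl (fun a k => a ||| 2^((e0 + d) + (m - 1 - k)*d)) 0 := by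
      apply PySem.List.foldl_congr_mem
      intro acc k hk
      have hk' : k < m := List.mem_range.mp hk
      have : m + 1 - 1 - k = (m - 1 - k) + 1 := by omega
      rw [this]
      ring_nf
    have hdvd : 2^(e0 + 1) ∣ ∑ k ∈ Finset.range m, 2^((e0 + d) + k*d) :=
      Finset.dvd_sum (fun k _ => pow_dvd_pow 2 (by omega))
    rw [hcg, ih (e0 + d), show m + 1 - 1 - m = 0 by omega,
      pvLorAdd (2^(e0 + 0*d)) _ (e0 + 1) (by
        have : e0 + 0*d < e0 + 1 := by omega
        exact Nat.pow_lt_pow_right (by norm_num) this) hdvd,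
      Finset.sum_range_succ']
    rw [Finset.sum_congr rfl (fun k _ => by ring_nf : ∀ k ∈ Finset.range m, (2:ℕ)^(e0 + d + k*d) = 2^(e0 + (k+1)*d))]

lemma pvGeomMul (d : ℕ) (hd : 1 ≤ d) (m : ℕ) :
    (2^d - 1) * ∑ k ∈ Finset.range m, 2^(k*d) = 2^(m*d) - 1 := by
  induction m with
  | zero => simp
  | succ m ih =>
    rw [Finset.sum_range_succ, Nat.mul_add, ih, Nat.sub_mul, one_mul]
    have h1 : 2^d * 2^(m*d) = 2^((m+1)*d) := by rw [← pow_add]; ring_nf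
    have h2 : (1:ℕ) ≤ 2^(m*d) := Nat.one_le_two_pow
    have h3 : (1:ℕ) ≤ 2^d := Nat.one_le_two_pow
    have h4 : 2^(m*d) ≤ 2^((m+1)*d) := Nat.pow_le_pow_right (by norm_num) (by nlinarith)
    omega

-- the full closed form: exact division then shift = the sum of the intermediate bits
lemma pvClosed (d e0 m : ℕ) (hd : 1 ≤ d) :
    (2^(m*d) - 1) / (2^d - 1) * 2^e0 = ∑ k ∈ Finset.range m, 2^(e0 + k*d) := by
  have hdiv : (2^(m*d) - 1) / (2^d - 1) = ∑ k ∈ Finset.range m, 2^(k*d) :=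
    Nat.div_eq_of_eq_mul_left
      (by have : (2:ℕ)^1 ≤ 2^d := Nat.pow_le_pow_right (by norm_num) hd; simpa using by omega)
      ((pvGeomMul d hd m).symm.trans (mul_comm _ _))
  rw [hdiv, Finset.sum_mul]
  exact Finset.sum_congr rfl (fun k _ => by rw [← pow_add]; ring_nf)

-- cast transport: the Int OR-fold of casted bits is the cast of the Nat fold
lemma pvCastFold (g : ℕ → ℕ) (l : List ℕ) : ∀ A : ℕ,
    l.foldl (fun bb k => Int.lor bb ((2^(g k) : ℕ) : ℤ)) ((A : ℕ) : ℤ)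
      = ((l.foldl (fun a k => a ||| 2^(g k)) A : ℕ) : ℤ) := by
  induction l with
  | nil => intro A; rfl
  | cons x xs ih =>
    intro A
    simp only [List.foldl_cons]
    rw [show Int.lor ((A : ℕ) : ℤ) ((2^(g x) : ℕ) : ℤ) = ((A ||| 2^(g x) : ℕ) : ℤ) from rfl]
    exact ih _

-- B's closed-form expression, with the shift amounts already resolved to Nat literals
lemma pvRHS (dN e0 m : ℕ) (hd : 1 ≤ dN) :
    (PySem.Int.floordiv (((1 <<< (m*dN) : ℕ) : ℤ) - 1) (((1 <<< dN : ℕ) : ℤ) - 1)) <<< e0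
      = ((∑ k ∈ Finset.range m, 2^(e0 + k*dN) : ℕ) : ℤ) := by
  have h1 : ((1 <<< (m*dN) : ℕ) : ℤ) - 1 = ((2^(m*dN) - 1 : ℕ) : ℤ) := by
    have : (1:ℕ) ≤ 2^(m*dN) := Nat.one_le_two_pow
    simp [Nat.shiftLeft_eq]
    try omega
  have h2 : ((1 <<< dN : ℕ) : ℤ) - 1 = ((2^dN - 1 : ℕ) : ℤ) := by
    have : (1:ℕ) ≤ 2^dN := Nat.one_le_two_pow
    simp [Nat.shiftLeft_eq]
    try omega
  rw [h1, h2, PySem.Int.floordiv_natCast,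
    show (((2^(m*dN) - 1) / (2^dN - 1) : ℕ) : ℤ) <<< e0
        = ((((2^(m*dN) - 1) / (2^dN - 1)) <<< e0 : ℕ) : ℤ) from rfl,
    Nat.shiftLeft_eq, pvClosed dN e0 m hd]

-- ---- the walk of A characterised as a guarded fold (A-side) ----

-- how many on-board steps the moving coordinate still allows (only meaningful when a step is ±1)
def roomE (sr sf fr ff i : Int) : Int :=
  if sr = 1 then 8 - (fr + i * sr)
  else if sr = -1 then (fr + i * sr) + 1
  else if sf = 1 then 8 - (ff + i * sf)
  else (ff + i * sf) + 1

set_option maxHeartbeats 1000000 in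
lemma betweenLoop_eq
    (sr sf fr ff tr tf n : Int)
    (hsr : sr = -1 ∨ sr = 0 ∨ sr = 1) (hsf : sf = -1 ∨ sf = 0 ∨ sf = 1)
    (hnz : ¬(sr = 0 ∧ sf = 0))
    (htr : tr = fr + n * sr) (htf : tf = ff + n * sf)
    (htf0 : 0 ≤ tf) (htf8 : tf < 8) :
    ∀ (fuel : Nat) (i bb : Int), 1 ≤ i → i ≤ n →
      ((0 ≤ fr + i * sr ∧ fr + i * sr < 8 ∧ 0 ≤ ff + i * sf ∧ ff + i * sf < 8) →
        min (n - i) (roomE sr sf fr ff i) + 1 ≤ (fuel : Int)) →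
      (1 : Int) ≤ (fuel : Int) →
      betweenLoop sr sf (8 * tr + tf) fuel bb (fr + i * sr) (ff + i * sf)
        = if 0 ≤ fr + i * sr ∧ fr + i * sr < 8 ∧ 0 ≤ ff + i * sf ∧ ff + i * sf < 8 ∧
              0 ≤ tr ∧ tr < 8
          then (PySem.List.pyRange i n 1).foldl
                (fun bb j => Int.lor bb (bit_for_py (index_for_py (fr + j * sr) (ff + j * sf)))) bb
          else 0 := by
  intro fuel
  induction fuel with
  | zero => intro i bb _ _ _ h1; norm_num at h1
  | succ m ih =>
    intro i bb hi1 hin hfu _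
    simp only [betweenLoop]
    by_cases honb : 0 ≤ fr + i * sr ∧ fr + i * sr < 8 ∧ 0 ≤ ff + i * sf ∧ ff + i * sf < 8
    · rw [if_pos honb]
      by_cases hieq : i = n
      · subst hieq
        rw [if_pos (show index_for_py (fr + i * sr) (ff + i * sf) = 8 * tr + tf by
              rw [htr, htf]; unfold index_for_py; ring)]
        rw [if_pos ⟨honb.1, honb.2.1, honb.2.2.1, honb.2.2.2,
              by rw [htr]; exact honb.1, by rw [htr]; exact honb.2.1⟩]
        rw [PySem.List.pyRange_one_eq_nil le_rfl, List.foldl_nil]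
      · have hilt : i < n := lt_of_le_of_ne hin hieq
        have hne : index_for_py (fr + i * sr) (ff + i * sf) ≠ 8 * tr + tf := by
          unfold index_for_py
          rw [htr, htf]
          intro h
          rcases hsr with rfl | rfl | rfl <;> rcases hsf with rfl | rfl | rfl <;>
            first
              | exact absurd ⟨rfl, rfl⟩ hnz
              | omega
        rw [if_neg hne]
        have hstep_r : fr + i * sr + sr = fr + (i + 1) * sr := by ring
        have hstep_f : ff + i * sf + sf = ff + (i + 1) * sf := by ring
        rw [hstep_r, hstep_f]
        have hroom1 : 1 ≤ roomE sr sf fr ff i := by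
          rcases hsr with rfl | rfl | rfl <;> rcases hsf with rfl | rfl | rfl <;>
            first
              | exact absurd ⟨rfl, rfl⟩ hnz
              | (unfold roomE; norm_num; omega)
        have hm1 : (1 : Int) ≤ (m : Int) := by have := hfu honb; omega
        have hroomstep : roomE sr sf fr ff (i + 1) = roomE sr sf fr ff i - 1 := by
          rcases hsr with rfl | rfl | rfl <;> rcases hsf with rfl | rfl | rfl <;>
            first
              | exact absurd ⟨rfl, rfl⟩ hnz
              | (unfold roomE; norm_num; ring)
        have hmfu : (0 ≤ fr + (i + 1) * sr ∧ fr + (i + 1) * sr < 8 ∧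
              0 ≤ ff + (i + 1) * sf ∧ ff + (i + 1) * sf < 8) →
            min (n - (i + 1)) (roomE sr sf fr ff (i + 1)) + 1 ≤ (m : Int) := by
          intro _
          have := hfu honb
          omega
        rw [ih (i + 1) (Int.lor bb (bit_for_py (index_for_py (fr + i * sr) (ff + i * sf))))
              (by omega) (by omega) hmfu hm1]
        by_cases htrb : 0 ≤ tr ∧ tr < 8
        · have honb1 : 0 ≤ fr + (i + 1) * sr ∧ fr + (i + 1) * sr < 8 ∧
              0 ≤ ff + (i + 1) * sf ∧ ff + (i + 1) * sf < 8 := by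
            rcases hsr with rfl | rfl | rfl <;> rcases hsf with rfl | rfl | rfl <;>
            first
              | exact absurd ⟨rfl, rfl⟩ hnz
              | omega
          rw [if_pos ⟨honb1.1, honb1.2.1, honb1.2.2.1, honb1.2.2.2, htrb.1, htrb.2⟩,
              if_pos ⟨honb.1, honb.2.1, honb.2.2.1, honb.2.2.2, htrb.1, htrb.2⟩]
          rw [PySem.List.pyRange_one_cons hilt, List.foldl_cons]
        · rw [if_neg (by tauto), if_neg (by tauto)]
    · rw [if_neg honb, if_neg (by tauto)]

-- shared aligned-direction step: A's 16-fuel walk from the first hop equals a guarded fold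
lemma aligned_eq
    (t fr ff tr tf sr sf n : Int)
    (ht : t = 8 * tr + tf) (htf0 : 0 ≤ tf) (htf8 : tf < 8)
    (hsr : sr = -1 ∨ sr = 0 ∨ sr = 1) (hsf : sf = -1 ∨ sf = 0 ∨ sf = 1)
    (hnz : ¬(sr = 0 ∧ sf = 0))
    (htr : tr = fr + n * sr) (htf : tf = ff + n * sf) (hn1 : 1 ≤ n) :
    betweenLoop sr sf t 16 0 (fr + sr) (ff + sf)
      = if ¬(0 ≤ t ∧ t ≤ 63 ∧ 0 ≤ fr + sr ∧ fr + sr < 8 ∧ 0 ≤ ff + sf ∧ ff + sf < 8) then 0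
        else (PySem.List.pyRange 1 n 1).foldl
              (fun bb i => Int.lor bb (bit_for_py (index_for_py (fr + i * sr) (ff + i * sf)))) 0 := by
  subst ht
  have h1 : fr + sr = fr + 1 * sr := by ring
  have h2 : ff + sf = ff + 1 * sf := by ring
  have hfu : (0 ≤ fr + 1 * sr ∧ fr + 1 * sr < 8 ∧ 0 ≤ ff + 1 * sf ∧ ff + 1 * sf < 8) →
      min (n - 1) (roomE sr sf fr ff 1) + 1 ≤ ((16 : Nat) : Int) := by
    intro h
    have : roomE sr sf fr ff 1 ≤ 8 := by
      rcases hsr with rfl | rfl | rfl <;> rcases hsf with rfl | rfl | rfl <;>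
        first
          | exact absurd ⟨rfl, rfl⟩ hnz
          | (unfold roomE; norm_num; omega)
    omega
  rw [h1, h2,
    betweenLoop_eq sr sf fr ff tr tf n hsr hsf hnz htr htf htf0 htf8 16 1 0 le_rfl hn1
      hfu (by norm_num)]
  by_cases hc : 0 ≤ fr + 1 * sr ∧ fr + 1 * sr < 8 ∧ 0 ≤ ff + 1 * sf ∧ ff + 1 * sf < 8 ∧
      0 ≤ tr ∧ tr < 8
  · rw [if_pos hc, if_neg (by rw [not_not]; exact ⟨by omega, by omega, by omega, by omega, by omega, by omega⟩)]
  · rw [if_neg hc, if_pos (by intro h; exact hc ⟨by omega, by omega, by omega, by omega, by omega, by omega⟩)]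

-- ---- the guarded fold equals B's geometric closed form ----

set_option maxHeartbeats 1000000 in
lemma fold_to_geom
    (fr ff sr sf n f t : Int)
    (hf : f = 8 * fr + ff) (ht : t = f + n * (8 * sr + sf))
    (hsr : sr = -1 ∨ sr = 0 ∨ sr = 1) (hsf : sf = -1 ∨ sf = 0 ∨ sf = 1)
    (hnz : ¬(sr = 0 ∧ sf = 0)) (hn : 1 ≤ n)
    (hhop0 : 0 ≤ 8 * (fr + sr) + (ff + sf)) (ht0 : 0 ≤ t) :
    (PySem.List.pyRange 1 n 1).foldl
        (fun bb i => Int.lor bb (bit_for_py (index_for_py (fr + i * sr) (ff + i * sf)))) 0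
      = (PySem.Int.floordiv
            ((1 <<< ((n - 1) * (PySem.Int.floordiv (max f t - min f t) n)).toNat) - 1)
            ((1 <<< (PySem.Int.floordiv (max f t - min f t) n).toNat) - 1))
          <<< (min f t + PySem.Int.floordiv (max f t - min f t) n).toNat := by
  have hδne : 8 * sr + sf ≠ 0 := by
    rcases hsr with rfl | rfl | rfl <;> rcases hsf with rfl | rfl | rfl <;>
      first | exact absurd ⟨rfl, rfl⟩ hnz | norm_num
  set m : ℕ := (n - 1).toNat with hmdef
  have hm : (m : ℤ) = n - 1 := Int.toNat_of_nonneg (by omega)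
  have hrange : PySem.List.pyRange 1 n 1 = (List.range m).map (fun k : ℕ => 1 + (k : ℤ)) := by
    rw [PySem.List.pyRange_one, ← hmdef]
  rcases lt_or_gt_of_ne hδne with hδneg | hδpos
  · -- descending direction: t < f, d = -(8*sr+sf)
    have hnδ : n * (8 * sr + sf) < 0 := mul_neg_of_pos_of_neg (by omega) hδneg
    have htlt : t < f := by omega
    have hmin : min f t = t := min_eq_right (le_of_lt htlt)
    have hmax : max f t = f := max_eq_left (le_of_lt htlt)
    set dN : ℕ := (-(8 * sr + sf)).toNat with hdNdef
    have hdN : (dN : ℤ) = -(8 * sr + sf) := Int.toNat_of_nonneg (by omega)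
    have hd1 : 1 ≤ dN := by omega
    have hd : PySem.Int.floordiv (max f t - min f t) n = (dN : ℤ) := by
      rw [hmin, hmax, show f - t = (dN : ℤ) * n by rw [hdN, ht]; ring,
        PySem.Int.floordiv_eq_ediv_of_pos (by omega), Int.mul_ediv_cancel _ (by omega)]
    set e0 : ℕ := (t + dN).toNat with he0def
    have he0 : (e0 : ℤ) = t + dN := Int.toNat_of_nonneg (by omega)
    rw [hd, hrange, List.foldl_map]
    have hcg : (List.range m).foldl
          (fun (bb : ℤ) (k : ℕ) => Int.lor bb (bit_for_py (index_for_py (fr + (1 + (k:ℤ)) * sr) (ff + (1 + (k:ℤ)) * sf)))) 0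
        = (List.range m).foldl (fun (bb : ℤ) (k : ℕ) => Int.lor bb ((2^(e0 + (m - 1 - k)*dN) : ℕ) : ℤ)) 0 := by
      apply PySem.List.foldl_congr_mem
      intro acc k hk
      have hk' : k < m := List.mem_range.mp hk
      have hmk : ((m - 1 - k : ℕ) : ℤ) = (m : ℤ) - 1 - (k : ℤ) := by omega
      have hx : index_for_py (fr + (1 + (k:ℤ)) * sr) (ff + (1 + (k:ℤ)) * sf)
          = ((e0 + (m - 1 - k)*dN : ℕ) : ℤ) := by
        unfold index_for_py
        push_cast
        rw [hmk, he0, hdN, hm, ht, hf]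
        ring
      rw [hx, show bit_for_py ((e0 + (m - 1 - k)*dN : ℕ) : ℤ)
            = ((1 <<< (e0 + (m - 1 - k)*dN) : ℕ) : ℤ) by
          unfold bit_for_py; rw [Int.toNat_natCast],
        show (1 <<< (e0 + (m - 1 - k)*dN) : ℕ) = 2^(e0 + (m - 1 - k)*dN) by
          simp [Nat.shiftLeft_eq]]
    rw [hcg, show (0 : ℤ) = ((0 : ℕ) : ℤ) from rfl,
      pvCastFold (fun k => e0 + (m - 1 - k)*dN) (List.range m) 0,
      pvFoldDesc dN hd1 m e0]
    have hsd : min f t + (dN : ℤ) = ((e0 : ℕ) : ℤ) := by rw [hmin, he0]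
    have hnd : (n - 1) * (dN : ℤ) = (((m * dN : ℕ) : ℤ)) := by push_cast; rw [hm]
    rw [hsd, Int.toNat_natCast, hnd, Int.toNat_natCast, Int.toNat_natCast]
    exact (pvRHS dN e0 m hd1).symm
  · -- ascending direction: f < t, d = 8*sr+sf
    have hnδ : 0 < n * (8 * sr + sf) := mul_pos (by omega) hδpos
    have htgt : f < t := by omega
    have hmin : min f t = f := min_eq_left (le_of_lt htgt)
    have hmax : max f t = t := max_eq_right (le_of_lt htgt)
    set dN : ℕ := (8 * sr + sf).toNat with hdNdef
    have hdN : (dN : ℤ) = 8 * sr + sf := Int.toNat_of_nonneg (by omega)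
    have hd1 : 1 ≤ dN := by omega
    have hd : PySem.Int.floordiv (max f t - min f t) n = (dN : ℤ) := by
      rw [hmin, hmax, show t - f = (dN : ℤ) * n by rw [hdN, ht]; ring,
        PySem.Int.floordiv_eq_ediv_of_pos (by omega), Int.mul_ediv_cancel _ (by omega)]
    set e0 : ℕ := (f + dN).toNat with he0def
    have he0 : (e0 : ℤ) = f + dN := Int.toNat_of_nonneg (by rw [hdN, hf]; omega)
    rw [hd, hrange, List.foldl_map]
    have hcg : (List.range m).foldl
          (fun (bb : ℤ) (k : ℕ) => Int.lor bb (bit_for_py (index_for_py (fr + (1 + (k:ℤ)) * sr) (ff + (1 + (k:ℤ)) * sf)))) 0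
        = (List.range m).foldl (fun (bb : ℤ) (k : ℕ) => Int.lor bb ((2^(e0 + k*dN) : ℕ) : ℤ)) 0 := by
      apply PySem.List.foldl_congr_mem
      intro acc k hk
      have hx : index_for_py (fr + (1 + (k:ℤ)) * sr) (ff + (1 + (k:ℤ)) * sf)
          = ((e0 + k*dN : ℕ) : ℤ) := by
        unfold index_for_py
        push_cast
        rw [he0, hdN, hf]
        ring
      rw [hx, show bit_for_py ((e0 + k*dN : ℕ) : ℤ) = ((1 <<< (e0 + k*dN) : ℕ) : ℤ) by
          unfold bit_for_py; rw [Int.toNat_natCast],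
        show (1 <<< (e0 + k*dN) : ℕ) = 2^(e0 + k*dN) by simp [Nat.shiftLeft_eq]]
    rw [hcg, show (0 : ℤ) = ((0 : ℕ) : ℤ) from rfl,
      pvCastFold (fun k => e0 + k*dN) (List.range m) 0,
      pvFoldAsc dN e0 hd1 m]
    have hsd : min f t + (dN : ℤ) = ((e0 : ℕ) : ℤ) := by rw [hmin, he0]
    have hnd : (n - 1) * (dN : ℤ) = (((m * dN : ℕ) : ℤ)) := by push_cast; rw [hm]
    rw [hsd, Int.toNat_natCast, hnd, Int.toNat_natCast, Int.toNat_natCast]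
    exact (pvRHS dN e0 m hd1).symm

-- ---- per-branch equality of the two cores ----

-- one aligned branch: A's walk equals B's guarded closed form
lemma branch_eq
    (f t fr ff tr tf sr sf n : Int)
    (hf : f = 8 * fr + ff) (ht : t = 8 * tr + tf) (htf0 : 0 ≤ tf) (htf8 : tf < 8)
    (hsr : sr = -1 ∨ sr = 0 ∨ sr = 1) (hsf : sf = -1 ∨ sf = 0 ∨ sf = 1)
    (hnz : ¬(sr = 0 ∧ sf = 0))
    (htr : tr = fr + n * sr) (htf : tf = ff + n * sf) (hn1 : 1 ≤ n) :
    betweenLoop sr sf t 16 0 (fr + sr) (ff + sf)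
      = if ¬(0 ≤ t ∧ t ≤ 63 ∧ 0 ≤ fr + sr ∧ fr + sr < 8 ∧ 0 ≤ ff + sf ∧ ff + sf < 8) then (0 : Int)
        else (PySem.Int.floordiv
                ((1 <<< ((n - 1) * (PySem.Int.floordiv (max f t - min f t) n)).toNat) - 1)
                ((1 <<< (PySem.Int.floordiv (max f t - min f t) n).toNat) - 1))
              <<< (min f t + PySem.Int.floordiv (max f t - min f t) n).toNat := by
  rw [aligned_eq t fr ff tr tf sr sf n ht htf0 htf8 hsr hsf hnz htr htf hn1]
  by_cases hG : 0 ≤ t ∧ t ≤ 63 ∧ 0 ≤ fr + sr ∧ fr + sr < 8 ∧ 0 ≤ ff + sf ∧ ff + sf < 8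
  · rw [if_neg (not_not_intro hG), if_neg (not_not_intro hG)]
    exact fold_to_geom fr ff sr sf n f t hf
      (by rw [ht, htr, htf, hf]; ring) hsr hsf hnz hn1
      (by obtain ⟨_, _, h3, _, h5, _⟩ := hG; omega) hG.1
  · rw [if_pos hG, if_pos hG]

set_option maxHeartbeats 1000000 in
lemma core_eq (f t fr ff tr tf : Int)
    (hne : ¬(tr - fr = 0 ∧ tf - ff = 0))
    (hf : f = 8 * fr + ff) (ht : t = 8 * tr + tf)
    (htf0 : 0 ≤ tf) (htf8 : tf < 8) :
    calcA_core t fr ff tr tf = calcB_core f t fr ff tr tf := by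
  unfold calcA_core calcB_core
  by_cases hb1 : tr - fr = 0 ∧ tf - ff ≠ 0
  · -- same rank
    have hB1 : ¬(tr - fr ≠ 0 ∧ tf - ff ≠ 0 ∧ |tr - fr| ≠ |tf - ff|) := by
      rintro ⟨h, _, _⟩; exact h hb1.1
    rw [if_pos hb1, if_neg hB1]
    have hsf : (if 0 < tf - ff then (1 : Int) else -1) =
        (if 0 < tf - ff then (1 : Int) else 0) - (if tf - ff < 0 then 1 else 0) := by
      rcases lt_trichotomy (tf - ff) 0 with h | h | h
      · rw [if_neg (by omega), if_neg (by omega), if_pos h]; norm_num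
      · exact absurd h hb1.2
      · rw [if_pos h, if_pos h, if_neg (by omega)]; norm_num
    have hsr0 : ((if 0 < tr - fr then (1 : Int) else 0) - (if tr - fr < 0 then 1 else 0)) = 0 := by
      rw [if_neg (by omega), if_neg (by omega)]; norm_num
    have hn : max |tr - fr| |tf - ff| = |tf - ff| := by
      rw [hb1.1, abs_zero]; exact max_eq_right (abs_nonneg _)
    dsimp only
    rw [hn, hsr0, ← hsf]
    exact branch_eq f t fr ff tr tf 0 (if 0 < tf - ff then 1 else -1) |tf - ff|
        hf ht htf0 htf8 (by norm_num) (by split_ifs <;> norm_num) (by rintro ⟨_, h⟩; revert h; split_ifs <;> norm_num)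
        (by omega)
        (by rcases lt_trichotomy (tf - ff) 0 with h | h | h
            · rw [if_neg (by omega), abs_of_neg h]; ring
            · exact absurd h hb1.2
            · rw [if_pos h, abs_of_pos h]; ring)
        (by have := abs_pos.mpr hb1.2; omega)
  rw [if_neg hb1]
  by_cases hb2 : tf - ff = 0 ∧ tr - fr ≠ 0
  · -- same file
    have hB2 : ¬(tr - fr ≠ 0 ∧ tf - ff ≠ 0 ∧ |tr - fr| ≠ |tf - ff|) := by
      rintro ⟨_, h, _⟩; exact h hb2.1
    rw [if_pos hb2, if_neg hB2]
    have hsr : (if 0 < tr - fr then (1 : Int) else -1) =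
        (if 0 < tr - fr then (1 : Int) else 0) - (if tr - fr < 0 then 1 else 0) := by
      rcases lt_trichotomy (tr - fr) 0 with h | h | h
      · rw [if_neg (by omega), if_neg (by omega), if_pos h]; norm_num
      · exact absurd h hb2.2
      · rw [if_pos h, if_pos h, if_neg (by omega)]; norm_num
    have hsf0 : ((if 0 < tf - ff then (1 : Int) else 0) - (if tf - ff < 0 then 1 else 0)) = 0 := by
      rw [if_neg (by omega), if_neg (by omega)]; norm_num
    have hn : max |tr - fr| |tf - ff| = |tr - fr| := by
      rw [hb2.1, abs_zero]; exact max_eq_left (abs_nonneg _)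
    dsimp only
    rw [hn, hsf0, ← hsr]
    exact branch_eq f t fr ff tr tf (if 0 < tr - fr then 1 else -1) 0 |tr - fr|
        hf ht htf0 htf8 (by split_ifs <;> norm_num) (by norm_num) (by rintro ⟨h, _⟩; revert h; split_ifs <;> norm_num)
        (by rcases lt_trichotomy (tr - fr) 0 with h | h | h
            · rw [if_neg (by omega), abs_of_neg h]; ring
            · exact absurd h hb2.2
            · rw [if_pos h, abs_of_pos h]; ring)
        (by omega)
        (by have := abs_pos.mpr hb2.2; omega)
  rw [if_neg hb2]
  by_cases hb3 : |tr - fr| = |tf - ff|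
  · -- diagonal
    have hdr : tr - fr ≠ 0 := by
      intro h
      rw [h, abs_zero] at hb3
      exact hne ⟨h, by have := hb3.symm; rwa [abs_eq_zero] at this⟩
    have hdf : tf - ff ≠ 0 := by
      intro h
      rw [h, abs_zero] at hb3
      exact hne ⟨by rwa [abs_eq_zero] at hb3, h⟩
    have hB3 : ¬(tr - fr ≠ 0 ∧ tf - ff ≠ 0 ∧ |tr - fr| ≠ |tf - ff|) := by
      rintro ⟨_, _, h⟩; exact h hb3
    rw [if_pos hb3, if_neg hB3]
    have hsr : (if 0 < tr - fr then (1 : Int) else -1) =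
        (if 0 < tr - fr then (1 : Int) else 0) - (if tr - fr < 0 then 1 else 0) := by
      rcases lt_trichotomy (tr - fr) 0 with h | h | h
      · rw [if_neg (by omega), if_neg (by omega), if_pos h]; norm_num
      · exact absurd h hdr
      · rw [if_pos h, if_pos h, if_neg (by omega)]; norm_num
    have hsf : (if 0 < tf - ff then (1 : Int) else -1) =
        (if 0 < tf - ff then (1 : Int) else 0) - (if tf - ff < 0 then 1 else 0) := by
      rcases lt_trichotomy (tf - ff) 0 with h | h | h
      · rw [if_neg (by omega), if_neg (by omega), if_pos h]; norm_num
      · exact absurd h hdf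
      · rw [if_pos h, if_pos h, if_neg (by omega)]; norm_num
    have hn : max |tr - fr| |tf - ff| = |tr - fr| := by rw [hb3]; exact max_self _
    dsimp only
    rw [hn, ← hsr, ← hsf]
    exact branch_eq f t fr ff tr tf (if 0 < tr - fr then 1 else -1)
        (if 0 < tf - ff then 1 else -1) |tr - fr|
        hf ht htf0 htf8 (by split_ifs <;> norm_num) (by split_ifs <;> norm_num)
        (by rintro ⟨h, _⟩; revert h; split_ifs <;> norm_num)
        (by rcases lt_trichotomy (tr - fr) 0 with h | h | h
            · rw [if_neg (by omega), abs_of_neg h]; ring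
            · exact absurd h hdr
            · rw [if_pos h, abs_of_pos h]; ring)
        (by rcases lt_trichotomy (tf - ff) 0 with h | h | h
            · rw [if_neg (by omega)]
              rw [abs_of_neg h] at hb3; omega
            · exact absurd h hdf
            · rw [if_pos h]
              rw [abs_of_pos h] at hb3; omega)
        (by have := abs_pos.mpr hdr; omega)
  · -- not aligned
    rw [if_neg hb3, if_pos ⟨by tauto, by tauto, hb3⟩]

-- ===== VERDICT (by name: the statement is the Claim_ definition above) =====
theorem calculate_single_between_py_spec : Claim_equal_calculate_single_between_py := by
  intro f t _
  unfold Spec_calculate_single_between_py calculate_single_between_py calculate_single_between_py_alt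
  by_cases hft : f = t
  · rw [if_pos hft, if_pos hft]
  · rw [if_neg hft, if_neg hft]
    simp only [rank_file_py]
    have hfid : PySem.Int.floordiv f 8 * 8 + PySem.Int.mod f 8 = f :=
      PySem.Int.floordiv_mul_add_mod f 8
    have htid : PySem.Int.floordiv t 8 * 8 + PySem.Int.mod t 8 = t :=
      PySem.Int.floordiv_mul_add_mod t 8
    have htf0 : 0 ≤ PySem.Int.mod t 8 := PySem.Int.mod_nonneg t (by norm_num)
    have htf8 : PySem.Int.mod t 8 < 8 := PySem.Int.mod_lt t (by norm_num)
    exact core_eq f t _ _ _ _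
      (by rintro ⟨h1, h2⟩; exact hft (by omega))
      (by omega) (by omega) htf0 htf8
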